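-- pv_equiv track=rewrite | github.com/ckoons/BubbleSpacetimeTheory | play/toy_1426_gf128_h1_cycles.py | minimal_poly_gf2
-- ===== SOURCE A (Python) =====
-- IRRED_POLY = (1 << 7) | (1 << 1) | 1  # 131
--
-- def gf128_mul(a, b):
--     """Multiply two elements in GF(2^7) using the irreducible polynomial."""
--     result = 0
--     while b > 0:
--         if b & 1:
--             result ^= a
--         a <<= 1
--         if a & (1 << 7):
--             a ^= IRRED_POLY
--         b >>= 1
--     return result
--
-- def frobenius(a):
--     """Frobenius automorphism: x -> x^2 in GF(2^7)."""
--     return gf128_mul(a, a)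
--
-- def minimal_poly_gf2(alpha):
--     """
--     Compute the minimal polynomial of alpha over GF(2).
--     The minimal polynomial is the product of (x - conjugate) for all
--     conjugates under Frobenius, computed in GF(2^7).
--     Returns coefficients as a list [c_0, c_1, ..., c_d] where
--     poly = c_0 + c_1*x + ... + c_d*x^d, each c_i in {0, 1}.
--     """
--     if alpha == 0:
--         return [0, 1]  # x
--     # Find orbit under Frobenius
--     orbit = []
--     current = alpha
--     while True:
--         orbit.append(current)
--         current = frobenius(current)
--         if current == alpha:
--             break
--     # Build minimal polynomial: product of (x - root) = product of (x + root) in char 2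
--     # Start with poly = [1] (constant 1)
--     # Poly represented as list of GF(2^7) coefficients, but they must end up in GF(2)
--     poly = [1]  # constant polynomial = 1
--     for root in orbit:
--         # Multiply poly by (x + root): new_poly[i] = poly[i-1] XOR root*poly[i]
--         new_poly = [0] * (len(poly) + 1)
--         for i in range(len(poly)):
--             new_poly[i + 1] ^= poly[i]          # x * poly[i] * x^i
--             new_poly[i] ^= gf128_mul(root, poly[i])  # root * poly[i] * x^i
--         poly = new_poly
--     # Coefficients should all be in GF(2) = {0, 1}
--     gf2_coeffs = [c & 1 for c in poly]  # In GF(2^7), elements in GF(2) are 0 and 1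
--     return gf2_coeffs
-- ===== SOURCE B (Python) =====
-- def minimal_poly_gf2(alpha):
--     """Minimal polynomial of alpha over GF(2) by Gaussian elimination on
--     successive powers alpha^0, alpha^1, ... viewed as GF(2) vectors."""
--     IRRED = (1 << 7) | (1 << 1) | 1
--
--     def mul(a, b):
--         r = 0
--         while b > 0:
--             if b & 1:
--                 r ^= a
--             a <<= 1
--             if a & (1 << 7):
--                 a ^= IRRED
--             b >>= 1
--         return r
--
--     pivots = {}  # leading bit -> (reduced vector, combination bitmask over powers)
--     power, k = 1, 0
--     while True:
--         vec, combo = power, 1 << k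
--         for bit in range(6, -1, -1):
--             if (vec >> bit) & 1 and bit in pivots:
--                 pv, pc = pivots[bit]
--                 vec ^= pv
--                 combo ^= pc
--         if vec == 0:
--             return [(combo >> i) & 1 for i in range(k + 1)]
--         pivots[vec.bit_length() - 1] = (vec, combo)
--         power = mul(power, alpha)
--         k += 1
-- ===== Notes on version B (the rewrite author's own statement) =====
-- stated objective: alternative
-- what changed: B computes the minimal polynomial by Gaussian elimination over GF(2) on successive powers of alpha (pivot rows with recorded combinations), instead of A's Frobenius-orbit enumeration followed by multiplying out the conjugate factors (x + root).
-- outside the precondition, e.g. on minimal_poly_gf2(-1): A does not finish within the time limit, B returns [0, 1]; on minimal_poly_gf2(128): A does not finish within the time limit, B returns [1, 0, 1, 1, 1, 1, 1, 1]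
import Mathlib
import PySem

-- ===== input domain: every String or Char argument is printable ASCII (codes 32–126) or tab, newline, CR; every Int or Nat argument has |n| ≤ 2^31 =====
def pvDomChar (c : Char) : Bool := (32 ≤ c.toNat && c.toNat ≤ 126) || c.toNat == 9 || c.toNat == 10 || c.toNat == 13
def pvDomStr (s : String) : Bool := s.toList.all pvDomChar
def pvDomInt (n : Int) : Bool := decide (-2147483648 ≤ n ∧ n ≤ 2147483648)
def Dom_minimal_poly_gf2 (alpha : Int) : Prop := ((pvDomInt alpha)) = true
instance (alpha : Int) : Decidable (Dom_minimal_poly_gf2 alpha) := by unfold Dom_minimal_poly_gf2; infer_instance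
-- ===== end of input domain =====

-- B replaces A's Frobenius-orbit / conjugate-product construction by Gaussian elimination
-- over GF(2) on the successive powers of alpha (objective: alternative algorithm, same cost on this fixed field).

-- ===== PORT A =====

def IRRED_POLY : Int := PySem.Int.bor (PySem.Int.bor (1 <<< 7) (1 <<< 1)) 1

-- 'while b > 0' of gf128_mul, ported with structural fuel; b is halved each pass, so
-- fuel 64 makes this exact for every b < 2^63 (all inputs admitted by Dom/Pre_).
def gf128_mulGo : Nat → Int → Int → Int → Int
  | 0, _, _, result => result
  | fuel + 1, a, b, result =>
    if b > 0 then
      let result := if PySem.Int.band b 1 ≠ 0 then PySem.Int.bxor result a else result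
      let a := a <<< 1
      let a := if PySem.Int.band a (1 <<< 7) ≠ 0 then PySem.Int.bxor a IRRED_POLY else a
      gf128_mulGo fuel a (b >>> 1) result
    else result

def gf128_mul (a b : Int) : Int := gf128_mulGo 64 a b 0

def frobeniusA (a : Int) : Int := gf128_mul a a

-- A's 'while True' orbit loop, ported with fuel; inside Pre_ the Frobenius orbit has
-- length at most 7, so fuel 128 is exact there.
def orbitGo : Nat → Int → Int → List Int → List Int
  | 0, _, _, orbit => orbit
  | fuel + 1, alpha, current, orbit =>
    let orbit := orbit ++ [current]
    let current := frobeniusA current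
    if current = alpha then orbit else orbitGo fuel alpha current orbit

-- inner 'for i in range(len(poly))' with in-place index assignments on new_poly
def polyStep (root : Int) (poly : List Int) : List Int :=
  (PySem.List.pyRange 0 poly.length 1).foldl
    (fun np i =>
      let np := PySem.List.pySetD np (i + 1)
        (PySem.Int.bxor (PySem.List.pyGetD np (i + 1) 0) (PySem.List.pyGetD poly i 0))
      PySem.List.pySetD np i
        (PySem.Int.bxor (PySem.List.pyGetD np i 0) (gf128_mul root (PySem.List.pyGetD poly i 0))))
    (List.replicate (poly.length + 1) (0 : Int))

def minimal_poly_gf2 (alpha : Int) : List Int :=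
  if alpha = 0 then [0, 1]
  else
    let orbit := orbitGo 128 alpha alpha []
    let poly := orbit.foldl (fun poly root => polyStep root poly) [1]
    poly.map (fun c => PySem.Int.band c 1)

-- ===== PORT B =====

-- B's local 'mul' (the same while-b>0 field multiply B reuses), fuel as in gf128_mulGo
def bMulGo : Nat → Int → Int → Int → Int
  | 0, _, _, r => r
  | fuel + 1, a, b, r =>
    if b > 0 then
      let r := if PySem.Int.band b 1 ≠ 0 then PySem.Int.bxor r a else r
      let a := a <<< 1
      let a := if PySem.Int.band a (1 <<< 7) ≠ 0 then
          PySem.Int.bxor a (PySem.Int.bor (PySem.Int.bor (1 <<< 7) (1 <<< 1)) 1) else a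
      bMulGo fuel a (b >>> 1) r
    else r

def bMul (a b : Int) : Int := bMulGo 64 a b 0

-- 'for bit in range(6, -1, -1)': reduce (vec, combo) against the recorded pivots.
-- bit ranges over 6..0, so 'vec >> bit' is ported as '>>> bit.toNat' (exact: bit ≥ 0).
def bReduce (pivots : PySem.Dict Int (Int × Int)) (vec combo : Int) : Int × Int :=
  (PySem.List.pyRange 6 (-1) (-1)).foldl
    (fun (p : Int × Int) bit =>
      if PySem.Int.band (p.1 >>> bit.toNat) 1 ≠ 0 then
        match PySem.Dict.get? pivots bit with
        | some pvpc => (PySem.Int.bxor p.1 pvpc.1, PySem.Int.bxor p.2 pvpc.2)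
        | none => p
      else p)
    (vec, combo)

-- B's 'while True' main loop, ported with fuel; inside Pre_ at most 8 powers are
-- generated before a dependency is found (k ≥ 0 throughout, so k.toNat is exact).
def bGo : Nat → Int → PySem.Dict Int (Int × Int) → Int → Int → List Int
  | 0, _, _, _, _ => []
  | fuel + 1, alpha, pivots, power, k =>
    let vc := bReduce pivots power (1 <<< k.toNat)
    if vc.1 = 0 then
      (PySem.List.pyRange 0 (k + 1) 1).map (fun i => PySem.Int.band (vc.2 >>> i.toNat) 1)
    else
      bGo fuel alpha
        (PySem.Dict.insert pivots (Int.ofNat (PySem.Int.bitLength vc.1) - 1) vc)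
        (bMul power alpha) (k + 1)

def minimal_poly_gf2_alt (alpha : Int) : List Int :=
  bGo 128 alpha PySem.Dict.empty 1 0

-- ===== PRECONDITION & SPEC =====
-- A terminates exactly on the GF(2^7) field elements 0..127; on every other integer
-- (negative, or ≥ 128) A's orbit/multiply loops never exit (A diverges), so Pre_
-- admits exactly the inputs on which the Python A returns.
def Pre_minimal_poly_gf2 (alpha : Int) : Prop := 0 ≤ alpha ∧ alpha < 128
instance (alpha : Int) : Decidable (Pre_minimal_poly_gf2 alpha) := by
  unfold Pre_minimal_poly_gf2; infer_instance

def pvWitness_minimal_poly_gf2 : Int := 3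

def Spec_minimal_poly_gf2 (alpha : Int) (out : List Int) : Prop := out = minimal_poly_gf2_alt alpha
instance (alpha : Int) (out : List Int) : Decidable (Spec_minimal_poly_gf2 alpha out) := by unfold Spec_minimal_poly_gf2; infer_instance

-- ===== CLAIM (what is proved, stated in full; the proofs are below) =====
def Claim_equal_minimal_poly_gf2 : Prop := ∀ (alpha : Int), Dom_minimal_poly_gf2 alpha → Pre_minimal_poly_gf2 alpha → Spec_minimal_poly_gf2 alpha (minimal_poly_gf2 alpha)

-- ===== LEMMAS AND PROOFS =====

-- the whole claim is a finite check over the 128 field elements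
set_option maxRecDepth 100000 in
set_option maxHeartbeats 4000000 in
lemma agree_fin : ∀ n : Fin 128, minimal_poly_gf2 (n : Int) = minimal_poly_gf2_alt (n : Int) := by
  decide

-- ===== VERDICT (by name: the statement is the Claim_ definition above) =====
theorem minimal_poly_gf2_spec : Claim_equal_minimal_poly_gf2 := by
  intro alpha _ hpre
  unfold Spec_minimal_poly_gf2
  obtain ⟨h0, h1⟩ := hpre
  have hn : alpha.toNat < 128 := by omega
  have := agree_fin ⟨alpha.toNat, hn⟩
  simpa [Int.toNat_of_nonneg h0] using this
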